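-- pv_equiv track=rewrite | github.com/XeroEZ/Erste-Hackathon---VVV | django-backend/BankApp/ChatBot/funkcie.py | remove_plural_duplicates
-- ===== SOURCE A (Python) =====
-- def remove_plural_duplicates(categories):
--     """Odstráni duplikáty kde jedna kategória je množné číslo druhej"""
--     categories_list = sorted(list(categories))
--     to_remove = set()
--
--     plural_rules = [
--         ('s', ''),           # yogurts -> yogurt
--         ('es', ''),          # boxes -> box
--         ('ies', 'y'),        # cookies -> cookie
--     ]
--
--     for category in categories_list:
--         for pattern, replacement in plural_rules:
--             if category.endswith(pattern):
--                 singular = category[:-len(pattern)] + replacement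
--                 if singular in categories_list:
--                     to_remove.add(category)
--                     break
--
--     return categories - to_remove
-- ===== SOURCE B (Python) =====
-- def remove_plural_duplicates(categories):
--     """Remove categories that are plural forms of other categories present."""
--     to_remove = set()
--     for s in categories:
--         candidates = [s + 's', s + 'es']
--         if s.endswith('y'):
--             candidates.append(s[:-1] + 'ies')
--         for c in candidates:
--             if c in categories:
--                 to_remove.add(c)
--     return categories - to_remove
-- ===== Notes on version B (the rewrite author's own statement) =====
-- stated objective: alternative
-- what changed: Instead of sorting and suffix-stripping each word against the plural rules with list membership, B treats each word as a potential singular: it generates the word's candidate plural forms (s+'s', s+'es', and s[:-1]+'ies' for words ending in 'y') and removes those present in the input set, with no sort and no suffix-stripping.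
import Mathlib
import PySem

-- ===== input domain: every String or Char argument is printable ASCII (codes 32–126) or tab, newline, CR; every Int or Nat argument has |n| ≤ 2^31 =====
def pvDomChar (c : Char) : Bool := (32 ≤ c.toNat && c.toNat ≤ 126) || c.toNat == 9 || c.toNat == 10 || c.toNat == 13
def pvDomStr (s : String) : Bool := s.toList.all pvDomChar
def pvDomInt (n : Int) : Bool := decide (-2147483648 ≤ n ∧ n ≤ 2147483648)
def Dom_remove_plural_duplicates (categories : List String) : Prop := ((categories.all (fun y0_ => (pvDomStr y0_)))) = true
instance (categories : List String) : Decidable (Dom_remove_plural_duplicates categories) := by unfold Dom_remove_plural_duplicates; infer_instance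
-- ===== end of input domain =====

-- B generates each word's candidate plural forms (s+'s', s+'es', s[:-1]+'ies' for s ending in 'y')
-- and removes those present in the input set, instead of A's sort + suffix-stripping of each word
-- against the plural rules (a different decomposition of the same removal set).

-- ===== PORT A =====
-- the inner "for pattern, replacement in plural_rules" loop with its break
def pvRuleScan (categories_list : List String) (category : String)
    (to_remove : PySem.Set String) : List (String × String) → PySem.Set String
  | [] => to_remove
  | (pattern, replacement) :: rest =>
    if PySem.Str.endswith category pattern then
      let singular := PySem.Str.slice category none (some (-(PySem.Str.len pattern : Int))) ++ replacement
      if singular ∈ categories_list then PySem.Set.add to_remove category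
      else pvRuleScan categories_list category to_remove rest
    else pvRuleScan categories_list category to_remove rest

def remove_plural_duplicates (categories : List String) : List String :=
  let categories_list := PySem.List.sorted categories (fun x => x) false
  let plural_rules : List (String × String) := [("s", ""), ("es", ""), ("ies", "y")]
  let to_remove : PySem.Set String :=
    categories_list.foldl
      (fun to_remove category => pvRuleScan categories_list category to_remove plural_rules)
      PySem.Set.empty
  PySem.Set.diff categories to_remove

-- ===== PORT B =====
def remove_plural_duplicates_alt (categories : List String) : List String :=
  let to_remove : PySem.Set String :=
    categories.foldl
      (fun to_remove s =>
        let candidates :=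
          [s ++ "s", s ++ "es"] ++
            (if PySem.Str.endswith s "y" then [PySem.Str.slice s none (some (-1)) ++ "ies"] else [])
        candidates.foldl (fun acc c => if c ∈ categories then PySem.Set.add acc c else acc) to_remove)
      PySem.Set.empty
  PySem.Set.diff categories to_remove

-- ===== PRECONDITION & SPEC =====
def Spec_remove_plural_duplicates (categories : List String) (out : List String) : Prop := out = remove_plural_duplicates_alt categories
instance (categories : List String) (out : List String) : Decidable (Spec_remove_plural_duplicates categories out) := by unfold Spec_remove_plural_duplicates; infer_instance

-- ===== CLAIM (what is proved, stated in full; the proofs are below) =====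
def Claim_equal_remove_plural_duplicates : Prop := ∀ (categories : List String), Dom_remove_plural_duplicates categories → Spec_remove_plural_duplicates categories (remove_plural_duplicates categories)

-- ===== LEMMAS AND PROOFS =====

-- A's per-word removal condition: some rule's singular form lies in L
def pvSing (w pat rep : String) : String :=
  PySem.Str.slice w none (some (-(PySem.Str.len pat : Int))) ++ rep

def pvCondA (L : List String) (w : String) : Prop :=
  (PySem.Str.endswith w "s" = true ∧ pvSing w "s" "" ∈ L) ∨
  (PySem.Str.endswith w "es" = true ∧ pvSing w "es" "" ∈ L) ∨
  (PySem.Str.endswith w "ies" = true ∧ pvSing w "ies" "y" ∈ L)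

-- B's candidate relation: w is one of s's generated plural forms
def pvCandP (s w : String) : Prop :=
  w = s ++ "s" ∨ w = s ++ "es" ∨
    (PySem.Str.endswith s "y" = true ∧ w = PySem.Str.slice s none (some (-1)) ++ "ies")

lemma mem_ruleScan_gen (L : List String) (cat : String) (rules : List (String × String))
    (acc : PySem.Set String) (x : String) :
    x ∈ pvRuleScan L cat acc rules ↔
      x ∈ acc ∨ (x = cat ∧ ∃ p ∈ rules, PySem.Str.endswith cat p.1 = true ∧ pvSing cat p.1 p.2 ∈ L) := by
  induction rules generalizing acc with
  | nil => simp [pvRuleScan]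
  | cons p rest ih =>
    obtain ⟨pat, rep⟩ := p
    rw [pvRuleScan]
    by_cases h1 : PySem.Str.endswith cat pat = true
    · by_cases h2 : pvSing cat pat rep ∈ L
      · simp only [pvSing] at h2
        simp only [h1, if_true]
        rw [if_pos h2]
        simp only [PySem.Set.mem_add, List.mem_cons]
        constructor
        · rintro (h|rfl)
          · tauto
          · exact Or.inr ⟨rfl, (pat, rep), Or.inl rfl, h1, by simpa [pvSing] using h2⟩
        · rintro (h|⟨rfl, _⟩) <;> tauto
      · simp only [pvSing] at h2
        simp only [h1, if_true]
        rw [if_neg h2, ih]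
        simp only [List.mem_cons]
        constructor
        · rintro (h|⟨rfl, q, hq, h3, h4⟩)
          · tauto
          · exact Or.inr ⟨rfl, q, Or.inr hq, h3, h4⟩
        · rintro (h|⟨rfl, q, hq | hq, h3, h4⟩)
          · tauto
          · subst hq; exact absurd h4 (by simpa [pvSing] using h2)
          · exact Or.inr ⟨rfl, q, hq, h3, h4⟩
    · rw [if_neg h1, ih]
      simp only [List.mem_cons]
      constructor
      · rintro (h|⟨rfl, q, hq, h3, h4⟩)
        · tauto
        · exact Or.inr ⟨rfl, q, Or.inr hq, h3, h4⟩
      · rintro (h|⟨rfl, q, hq | hq, h3, h4⟩)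
        · tauto
        · subst hq; exact absurd h3 h1
        · exact Or.inr ⟨rfl, q, hq, h3, h4⟩

lemma mem_ruleScan (L : List String) (cat : String) (acc : PySem.Set String) (x : String) :
    x ∈ pvRuleScan L cat acc [("s", ""), ("es", ""), ("ies", "y")] ↔
      x ∈ acc ∨ (x = cat ∧ pvCondA L cat) := by
  rw [mem_ruleScan_gen, pvCondA]
  simp

lemma mem_foldA (L : List String) (todo : List String) (acc : PySem.Set String) (x : String) :
    x ∈ todo.foldl (fun a c => pvRuleScan L c a [("s", ""), ("es", ""), ("ies", "y")]) acc ↔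
      x ∈ acc ∨ (x ∈ todo ∧ pvCondA L x) := by
  induction todo generalizing acc with
  | nil => simp
  | cons c cs ih =>
    simp only [List.foldl_cons, ih, mem_ruleScan, List.mem_cons]
    constructor
    · rintro ((h|⟨rfl,h⟩)|⟨h1,h2⟩) <;> tauto
    · rintro (h|⟨rfl|h1,h2⟩) <;> tauto

lemma mem_foldB_inner (S : List String) (cands : List String) (acc : PySem.Set String) (x : String) :
    x ∈ cands.foldl (fun a c => if c ∈ S then PySem.Set.add a c else a) acc ↔
      x ∈ acc ∨ (x ∈ cands ∧ x ∈ S) := by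
  induction cands generalizing acc with
  | nil => simp
  | cons c cs ih =>
    simp only [List.foldl_cons, ih, List.mem_cons]
    by_cases h : c ∈ S
    · rw [if_pos h]
      simp only [PySem.Set.mem_add]
      constructor
      · rintro ((h1|rfl)|⟨h1,h2⟩) <;> tauto
      · rintro (h1|⟨rfl|h1,h2⟩) <;> tauto
    · rw [if_neg h]
      constructor
      · rintro (h1|⟨h1,h2⟩) <;> tauto
      · rintro (h1|⟨rfl|h1,h2⟩) <;> tauto

lemma mem_foldB (S : List String) (todo : List String) (acc : PySem.Set String) (x : String) :
    x ∈ todo.foldl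
        (fun a s =>
          ([s ++ "s", s ++ "es"] ++
            (if PySem.Str.endswith s "y" then [PySem.Str.slice s none (some (-1)) ++ "ies"] else [])).foldl
            (fun acc c => if c ∈ S then PySem.Set.add acc c else acc) a) acc ↔
      x ∈ acc ∨ ((∃ s ∈ todo, pvCandP s x) ∧ x ∈ S) := by
  induction todo generalizing acc with
  | nil => simp
  | cons c cs ih =>
    simp only [List.foldl_cons, ih, mem_foldB_inner]
    have hc : x ∈ ([c ++ "s", c ++ "es"] ++
        (if PySem.Str.endswith c "y" then [PySem.Str.slice c none (some (-1)) ++ "ies"] else [])) ↔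
        pvCandP c x := by
      unfold pvCandP
      split_ifs with h <;> simp at h <;> simp [h]
    rw [hc]
    simp only [List.mem_cons]
    constructor
    · rintro ((h|⟨h1,h2⟩)|⟨⟨s,hs,h1⟩,h2⟩)
      · tauto
      · exact Or.inr ⟨⟨c, Or.inl rfl, h1⟩, h2⟩
      · exact Or.inr ⟨⟨s, Or.inr hs, h1⟩, h2⟩
    · rintro (h|⟨⟨s,rfl|hs,h1⟩,h2⟩)
      · tauto
      · exact Or.inl (Or.inr ⟨h1, h2⟩)
      · exact Or.inr ⟨⟨s, hs, h1⟩, h2⟩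

lemma pv_endswith_iff (w p : String) : PySem.Str.endswith w p = true ↔ p.toList <:+ w.toList := by
  simp [PySem.Chars.endswith_iff]

lemma toList_sing1 (w : String) : (pvSing w "s" "").toList = w.toList.dropLast := by
  have h1 : -(PySem.Str.len "s" : Int) = (-1 : Int) := by simp [PySem.Str.len_eq]
  rw [pvSing, h1, String.toList_append]
  simp [PySem.List.slice_to_neg_one]

lemma toList_sing2 (w : String) :
    (pvSing w "es" "").toList = w.toList.take (w.toList.length - 2) := by
  have h1 : (PySem.Str.len "es" : Int) = ((2 : Nat) : Int) := by simp [PySem.Str.len_eq]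
  simp only [pvSing, h1, String.toList_append]
  simp only [PySem.Str.toList_slice, PySem.Chars.slice_eq_listSlice]
  rw [PySem.List.slice_to_neg_natCast _ 2 (by omega)]
  simp

lemma toList_sing3 (w : String) :
    (pvSing w "ies" "y").toList = w.toList.take (w.toList.length - 3) ++ ['y'] := by
  have h1 : (PySem.Str.len "ies" : Int) = ((3 : Nat) : Int) := by simp [PySem.Str.len_eq]
  simp only [pvSing, h1, String.toList_append]
  simp only [PySem.Str.toList_slice, PySem.Chars.slice_eq_listSlice]
  rw [PySem.List.slice_to_neg_natCast _ 3 (by omega)]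
  simp

-- the heart: "some rule strips x to a word of S" ≡ "x is a generated plural of some word of S"
lemma condA_iff_cand (S : List String) (x : String) :
    pvCondA S x ↔ ∃ s ∈ S, pvCandP s x := by
  constructor
  · rintro (⟨h1, h2⟩ | ⟨h1, h2⟩ | ⟨h1, h2⟩)
    · obtain ⟨t, ht⟩ := (pv_endswith_iff x "s").mp h1
      refine ⟨pvSing x "s" "", h2, Or.inl ?_⟩
      apply String.toList_inj.mp
      rw [String.toList_append, toList_sing1, ← ht]
      simp
    · obtain ⟨t, ht⟩ := (pv_endswith_iff x "es").mp h1
      refine ⟨pvSing x "es" "", h2, Or.inr (Or.inl ?_)⟩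
      apply String.toList_inj.mp
      rw [String.toList_append, toList_sing2, ← ht]
      simp
    · obtain ⟨t, ht⟩ := (pv_endswith_iff x "ies").mp h1
      have hts : (pvSing x "ies" "y").toList = t ++ ['y'] := by
        rw [toList_sing3, ← ht]; simp
      refine ⟨pvSing x "ies" "y", h2, Or.inr (Or.inr ⟨?_, ?_⟩)⟩
      · rw [pv_endswith_iff, hts]; exact ⟨t, by simp⟩
      · apply String.toList_inj.mp
        rw [String.toList_append, PySem.Str.slice_to_neg_one, hts, ← ht]
        simp
  · rintro ⟨s, hs, (rfl | rfl | ⟨hy, rfl⟩)⟩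
    · refine Or.inl ⟨?_, ?_⟩
      · rw [pv_endswith_iff]; exact ⟨s.toList, by simp⟩
      · have : pvSing (s ++ "s") "s" "" = s := by
          apply String.toList_inj.mp
          rw [toList_sing1]; simp
        rwa [this]
    · refine Or.inr (Or.inl ⟨?_, ?_⟩)
      · rw [pv_endswith_iff]; exact ⟨s.toList, by simp⟩
      · have : pvSing (s ++ "es") "es" "" = s := by
          apply String.toList_inj.mp
          rw [toList_sing2]; simp
        rwa [this]
    · obtain ⟨u, hu⟩ := (pv_endswith_iff s "y").mp hy
      have hsl : (PySem.Str.slice s none (some (-1))).toList = u := by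
        rw [PySem.Str.slice_to_neg_one, ← hu]; simp
      refine Or.inr (Or.inr ⟨?_, ?_⟩)
      · rw [pv_endswith_iff, String.toList_append, hsl]; exact ⟨u, by simp⟩
      · have : pvSing (PySem.Str.slice s none (some (-1)) ++ "ies") "ies" "y" = s := by
          apply String.toList_inj.mp
          rw [toList_sing3, String.toList_append, hsl, ← hu]
          simp
        rwa [this]

lemma diff_congr (S : List String) (t1 t2 : PySem.Set String) (h : ∀ y, y ∈ t1 ↔ y ∈ t2) :
    PySem.Set.diff S t1 = PySem.Set.diff S t2 := by
  unfold PySem.Set.diff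
  apply List.filter_congr
  intro x _
  have hb : (PySem.Set.contains t1 x = true) ↔ (PySem.Set.contains t2 x = true) := by
    simpa [PySem.Set.contains_iff] using h x
  rw [Bool.eq_iff_iff.mpr hb]

theorem remove_plural_duplicates_spec_aux (categories : List String) :
    remove_plural_duplicates categories = remove_plural_duplicates_alt categories := by
  rw [remove_plural_duplicates, remove_plural_duplicates_alt]
  apply diff_congr
  intro y
  rw [mem_foldA, mem_foldB]
  have hmem : ∀ z : String, z ∈ PySem.List.sorted categories (fun x => x) false ↔ z ∈ categories :=
    fun z => PySem.List.mem_sorted categories (fun x => x) false z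
  have hcond : pvCondA (PySem.List.sorted categories (fun x => x) false) y ↔ pvCondA categories y := by
    simp only [pvCondA, hmem]
  have hempty : ∀ z : String, z ∈ (PySem.Set.empty : PySem.Set String) ↔ False := by
    simp [PySem.Set.empty]
  rw [hmem, hcond, condA_iff_cand]
  simp only [hempty y, false_or]
  tauto

-- ===== VERDICT (by name: the statement is the Claim_ definition above) =====
theorem remove_plural_duplicates_spec : Claim_equal_remove_plural_duplicates := by
  intro categories _
  exact remove_plural_duplicates_spec_aux categories
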